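-- pv_equiv track=rewrite | github.com/Qwwery/Infinite-Realm | maps.py | add_wall
-- ===== SOURCE A (Python) =====
-- def add_wall(field):
--     max_len = max(map(lambda x: len(x), field)) + 2
--     for i in range(len(field)):
--         field[i] = [' '] + field[i] + [' ']
--         while len(field[i]) != max_len:
--             field[i].append(' ')
--
--     spaces = [" " for _ in range(len(field[0]))]
--     field.insert(0, spaces.copy())
--     field.extend([spaces.copy()])
--
--     for y in range(1, len(field) - 1):
--         for x in range(1, len(field[0]) - 1):
--             if field[y][x] != ' ' and field[y][x] != "С":
--                 if x - 1 >= 0 and field[y][x - 1] == ' ':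
--                     field[y][x - 1] = 'С'
--                 if x - 1 >= 0 and y - 1 >= 0 and field[y - 1][x - 1] == ' ':
--                     field[y - 1][x - 1] = 'С'
--                 if y - 1 >= 0 and field[y - 1][x] == ' ':
--                     field[y - 1][x] = 'С'
--                 if y - 1 >= 0 and x + 1 < len(field[0]) and field[y - 1][x + 1] == ' ':
--                     field[y - 1][x + 1] = 'С'
--                 if x + 1 < len(field[0]) and field[y][x + 1] == ' ':
--                     field[y][x + 1] = 'С'
--                 if y + 1 < len(field) and field[y + 1][x] == ' ':
--                     field[y + 1][x] = 'С'
--                 if y + 1 < len(field) and x - 1 >= 0 and field[y + 1][x - 1] == ' ':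
--                     field[y + 1][x - 1] = 'С'
--                 if y + 1 < len(field) and x + 1 < len(field[0]) and field[y + 1][x + 1] == ' ':
--                     field[y + 1][x + 1] = 'С'
--     return field
-- ===== SOURCE B (Python) =====
-- NEIGHBORS = [(-1, -1), (-1, 0), (-1, 1), (0, -1), (0, 1), (1, -1), (1, 0), (1, 1)]
--
--
-- def add_wall(field):
--     # Pure recomputation: build the padded grid, then produce every cell's final
--     # value directly (a space becomes 'С' iff some neighbour is a filled source
--     # cell of the padded grid) instead of A's in-place neighbour-marking sweep.
--     # Like A, mutates the outer `field` list in place (field[:] = ...).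
--     width = max(len(r) for r in field) + 2
--     grid = ([[' '] * width]
--             + [[' '] + r + [' '] * (width - len(r) - 1) for r in field]
--             + [[' '] * width])
--     h = len(grid)
--
--     def filled(y, x):
--         return (1 <= y < h - 1 and 1 <= x < width - 1
--                 and grid[y][x] != ' ' and grid[y][x] != 'С')
--
--     field[:] = [['С' if c == ' ' and any(filled(y + dy, x + dx) for dy, dx in NEIGHBORS)
--                  else c
--                  for x, c in enumerate(row)]
--                 for y, row in enumerate(grid)]
--     return field
-- ===== Notes on version B (the rewrite author's own statement) =====
-- stated objective: alternative
-- what changed: B replaces A's stateful in-place sweep (scan each interior cell and write 'С' into the 8 surrounding cells one guarded statement at a time) by a pure per-cell recomputation: it builds the padded grid once and maps every cell to its final value directly (a space becomes 'С' iff one of its 8 neighbours is a filled interior cell of the padded grid), equivalent because marking only turns spaces into 'С' and marked cells are never sources.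
import Mathlib
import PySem

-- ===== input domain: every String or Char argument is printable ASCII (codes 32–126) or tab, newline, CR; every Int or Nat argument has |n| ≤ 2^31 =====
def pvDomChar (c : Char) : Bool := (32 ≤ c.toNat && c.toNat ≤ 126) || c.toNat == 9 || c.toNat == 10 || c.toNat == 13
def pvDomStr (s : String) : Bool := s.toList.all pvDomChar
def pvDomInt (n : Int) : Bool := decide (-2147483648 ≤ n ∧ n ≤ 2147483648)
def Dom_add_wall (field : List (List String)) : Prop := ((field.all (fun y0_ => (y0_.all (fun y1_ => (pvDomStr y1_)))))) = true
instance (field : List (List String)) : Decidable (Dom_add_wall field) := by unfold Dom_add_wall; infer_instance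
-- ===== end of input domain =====

-- B recomputes every cell's final value directly from the padded grid (a space
-- becomes 'С' iff some neighbour is a filled source cell) instead of A's
-- in-place neighbour-marking sweep; both Pythons mutate `field` in place
-- identically, and the equivalence proved here is about the RETURN value.

-- ===== PORT A =====
-- shared cell accessors: all indices used are provably in range in the Python,
-- so plain Nat indexing with defaults is exact there
def pvGet (g : List (List String)) (y x : Nat) : String := (g.getD y []).getD x ""
def pvSet (g : List (List String)) (y x : Nat) (v : String) : List (List String) :=
  g.set y ((g.getD y []).set x v)

-- `while len(field[i]) != max_len: field[i].append(' ')` — fuel = max_len suffices,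
-- since the wrapped row has length ≤ max_len
def pvPadLoop : Nat → Nat → List String → List String
  | 0, _, row => row
  | fuel + 1, m, row => if row.length ≠ m then pvPadLoop fuel m (row ++ [" "]) else row

-- one Python `if <bounds> and field[b][a] == ' ': field[b][a] = 'С'` statement
def pvGuard (c : Prop) [Decidable c] (g : List (List String)) (y x : Nat) : List (List String) :=
  if c ∧ pvGet g y x = " " then pvSet g y x "С" else g

-- the body of A's double loop: the 8 guarded neighbour writes, in A's order
-- (indices come from range(1,·), hence are nonnegative, so .toNat is exact here)
def pvStepA (H W : Int) (g : List (List String)) (y x : Int) : List (List String) :=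
  if pvGet g y.toNat x.toNat ≠ " " ∧ pvGet g y.toNat x.toNat ≠ "С" then
    pvGuard (y + 1 < H ∧ x + 1 < W)
      (pvGuard (y + 1 < H ∧ 0 ≤ x - 1)
        (pvGuard (y + 1 < H)
          (pvGuard (x + 1 < W)
            (pvGuard (0 ≤ y - 1 ∧ x + 1 < W)
              (pvGuard (0 ≤ y - 1)
                (pvGuard (0 ≤ x - 1 ∧ 0 ≤ y - 1)
                  (pvGuard (0 ≤ x - 1) g y.toNat (x - 1).toNat)
                  (y - 1).toNat (x - 1).toNat)
                (y - 1).toNat x.toNat)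
              (y - 1).toNat (x + 1).toNat)
            y.toNat (x + 1).toNat)
          (y + 1).toNat x.toNat)
        (y + 1).toNat (x - 1).toNat)
      (y + 1).toNat (x + 1).toNat
  else g

def add_wall (field : List (List String)) : List (List String) :=
  let maxLen := ((field.map (fun r => r.length)).max?.getD 0) + 2
  let f1 := field.map (fun r => pvPadLoop maxLen maxLen ([" "] ++ r ++ [" "]))
  let spaces := List.replicate (f1.getD 0 []).length " "
  let f2 := spaces :: (f1 ++ [spaces])
  let H : Int := f2.length
  let W : Int := (f2.getD 0 []).length
  (PySem.List.pyRange 1 (H - 1) 1).foldl (fun g y =>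
    (PySem.List.pyRange 1 (W - 1) 1).foldl (fun g x => pvStepA H W g y x) g) f2

-- ===== PORT B =====
-- NEIGHBORS
def pvOffsets : List (Int × Int) :=
  [(-1, -1), (-1, 0), (-1, 1), (0, -1), (0, 1), (1, -1), (1, 0), (1, 1)]

-- `filled(y, x)`: bounds check then two inequality tests on the padded grid
def pvFilled (grid : List (List String)) (h width : Int) (y x : Int) : Bool :=
  decide (1 ≤ y ∧ y < h - 1 ∧ 1 ≤ x ∧ x < width - 1) &&
  (pvGet grid y.toNat x.toNat != " ") && (pvGet grid y.toNat x.toNat != "С")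

def add_wall_alt (field : List (List String)) : List (List String) :=
  let width := ((field.map (fun r => r.length)).max?.getD 0) + 2
  let grid := [List.replicate width " "] ++
    field.map (fun r => [" "] ++ r ++ List.replicate (width - r.length - 1) " ") ++
    [List.replicate width " "]
  let h : Int := grid.length
  (PySem.List.enumerate grid 0).map (fun yr =>
    (PySem.List.enumerate yr.2 0).map (fun xc =>
      if xc.2 = " " ∧
          (pvOffsets.any (fun d => pvFilled grid h (width : Int) (yr.1 + d.1) (xc.1 + d.2))) = true
      then "С" else xc.2))

-- ===== PRECONDITION & SPEC =====
-- Pre_ excludes only the empty grid, on which A's `max` raises ValueError.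
def Pre_add_wall (field : List (List String)) : Prop := field ≠ []
instance (field : List (List String)) : Decidable (Pre_add_wall field) := by
  unfold Pre_add_wall; infer_instance
def pvWitness_add_wall : List (List String) := [["x"]]

def Spec_add_wall (field : List (List String)) (out : List (List String)) : Prop := out = add_wall_alt field
instance (field : List (List String)) (out : List (List String)) : Decidable (Spec_add_wall field out) := by unfold Spec_add_wall; infer_instance

-- ===== CLAIM (what is proved, stated in full; the proofs are below) =====
def Claim_equal_add_wall : Prop := ∀ (field : List (List String)), Dom_add_wall field → Pre_add_wall field → Spec_add_wall field (add_wall field)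

-- ===== LEMMAS AND PROOFS =====

-- a single conditional write ' '→'С', and the 8-neighbour mark of one source cell
def pvCondSet (g : List (List String)) (y x : Nat) : List (List String) :=
  if pvGet g y x = " " then pvSet g y x "С" else g

def pvMarkB (g : List (List String)) (y x : Int) : List (List String) :=
  pvOffsets.foldl (fun g d => pvCondSet g (y + d.1).toNat (x + d.2).toNat) g

-- (y,x) is one of the 8 neighbour cells written when (sy,sx) is a source
def pvAdjB (sy sx : Int) (y x : Nat) : Bool :=
  (pvOffsets.map (fun d => ((sy + d.1).toNat, (sx + d.2).toNat))).contains (y, x)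

-- grid difference invariant: during marking, cells only ever change from ' ' to 'С'
def pvInv (P g : List (List String)) : Prop :=
  ∀ y x : Nat, pvGet g y x = pvGet P y x ∨ (pvGet P y x = " " ∧ pvGet g y x = "С")

lemma pvInv_refl (P : List (List String)) : pvInv P P := fun _ _ => Or.inl rfl

lemma pvGetD_set_self {α : Type} (l : List α) (i : Nat) (a d : α) (h : i < l.length) :
    (l.set i a).getD i d = a := by
  simp [List.getD, List.getElem?_set_self h]

lemma pvGetD_set_ne {α : Type} (l : List α) (i j : Nat) (a : α) (d : α) (h : i ≠ j) :
    (l.set i a).getD j d = l.getD j d := by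
  simp [List.getD, List.getElem?_set_ne h]

lemma pvGet_space_in_range (g : List (List String)) (y x : Nat) (h : pvGet g y x = " ") :
    y < g.length ∧ x < (g.getD y []).length := by
  constructor
  · by_contra hy
    rw [pvGet, List.getD_eq_default g _ (by omega)] at h
    simp [List.getD] at h
  · by_contra hx
    rw [pvGet, List.getD_eq_default (g.getD y []) _ (by omega)] at h
    exact absurd h (by decide)

lemma pvGet_pvSet_ne (g : List (List String)) (y x y' x' : Nat) (v : String)
    (h : y ≠ y' ∨ x ≠ x') : pvGet (pvSet g y x v) y' x' = pvGet g y' x' := by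
  by_cases hy : y = y'
  · subst hy
    have hx : x ≠ x' := h.resolve_left (by simp)
    by_cases hlen : y < g.length
    · rw [pvGet, pvSet, pvGetD_set_self g y _ [] hlen, pvGetD_set_ne _ x x' v "" hx]
      rfl
    · rw [pvSet, List.set_eq_of_length_le (by omega)]
  · rw [pvGet, pvSet, pvGetD_set_ne g y y' _ [] hy]
    rfl

lemma pvGet_pvSet_self (g : List (List String)) (y x : Nat) (v : String)
    (hy : y < g.length) (hx : x < (g.getD y []).length) : pvGet (pvSet g y x v) y x = v := by
  rw [pvGet, pvSet, pvGetD_set_self g y _ [] hy, pvGetD_set_self _ x v "" hx]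

-- pointwise value of one conditional write
lemma pvGet_condSet (g : List (List String)) (a b y x : Nat) :
    pvGet (pvCondSet g a b) y x =
      if (a = y ∧ b = x) ∧ pvGet g y x = " " then "С" else pvGet g y x := by
  by_cases hp : a = y ∧ b = x
  · obtain ⟨rfl, rfl⟩ := hp
    by_cases hs : pvGet g a b = " "
    · obtain ⟨hy, hx⟩ := pvGet_space_in_range g a b hs
      rw [pvCondSet, if_pos hs, pvGet_pvSet_self g a b _ hy hx, if_pos ⟨⟨rfl, rfl⟩, hs⟩]
    · rw [pvCondSet, if_neg hs, if_neg (fun h => hs h.2)]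
  · rw [if_neg (fun h => hp h.1), pvCondSet]
    split
    · exact pvGet_pvSet_ne g a b y x _ (by tauto)
    · rfl

-- pointwise value of a fold of conditional writes over a list of cells
lemma pvGet_foldCond (ps : List (Nat × Nat)) :
    ∀ (g : List (List String)) (y x : Nat),
      pvGet (ps.foldl (fun g p => pvCondSet g p.1 p.2) g) y x =
        if ps.contains (y, x) ∧ pvGet g y x = " " then "С" else pvGet g y x := by
  induction ps with
  | nil => intro g y x; simp
  | cons p ps ih =>
    rcases p with ⟨a, b⟩
    intro g y x
    simp only [List.foldl_cons]
    by_cases hs : pvGet g y x = " "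
    · by_cases hp : a = y ∧ b = x
      · obtain ⟨rfl, rfl⟩ := hp
        have hinner : pvGet (pvCondSet g a b) a b = "С" := by
          rw [pvGet_condSet]; simp [hs]
        rw [ih, hinner, if_neg (by rintro ⟨-, h⟩; exact absurd h (by decide)),
          if_pos ⟨by simp, hs⟩]
      · have hinner : pvGet (pvCondSet g a b) y x = pvGet g y x := by
          rw [pvGet_condSet, if_neg (fun h => hp h.1)]
        have hpair : ¬((y, x) = ((a, b) : Nat × Nat)) := by
          simp only [Prod.mk.injEq]; tauto
        have hc : ((a, b) :: ps).contains (y, x) = ps.contains (y, x) := by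
          simp [hpair]
        rw [ih, hinner, hc]
    · have hinner : pvGet (pvCondSet g a b) y x = pvGet g y x := by
        rw [pvGet_condSet, if_neg (fun h => hs h.2)]
      rw [ih, hinner, if_neg (fun h => hs h.2), if_neg (fun h => hs h.2)]

-- pointwise value of marking one source cell
lemma pvGet_markB (g : List (List String)) (sy sx : Int) (y x : Nat) :
    pvGet (pvMarkB g sy sx) y x =
      if pvAdjB sy sx y x ∧ pvGet g y x = " " then "С" else pvGet g y x := by
  have : pvMarkB g sy sx =
      (pvOffsets.map (fun d => ((sy + d.1).toNat, (sx + d.2).toNat))).foldl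
        (fun g p => pvCondSet g p.1 p.2) g := by
    rw [List.foldl_map]; rfl
  rw [this, pvGet_foldCond, pvAdjB]

-- pointwise value of the whole marking fold over a list of source cells
lemma pvGet_srcFold (L : List (Int × Int)) :
    ∀ (g : List (List String)) (y x : Nat),
      pvGet (L.foldl (fun g p => pvMarkB g p.1 p.2) g) y x =
        if (L.any (fun s => pvAdjB s.1 s.2 y x)) ∧ pvGet g y x = " " then "С"
        else pvGet g y x := by
  induction L with
  | nil => intro g y x; simp
  | cons s L ih =>
    intro g y x
    simp only [List.foldl_cons]
    by_cases hs : pvGet g y x = " "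
    · by_cases ha : pvAdjB s.1 s.2 y x = true
      · have hinner : pvGet (pvMarkB g s.1 s.2) y x = "С" := by
          rw [pvGet_markB, if_pos ⟨ha, hs⟩]
        rw [ih, hinner, if_neg (by rintro ⟨-, h⟩; exact absurd h (by decide)),
          if_pos ⟨by simp [List.any_cons, ha], hs⟩]
      · have hinner : pvGet (pvMarkB g s.1 s.2) y x = pvGet g y x := by
          rw [pvGet_markB, if_neg (fun h => ha h.1)]
        have hc : ((s :: L).any (fun s => pvAdjB s.1 s.2 y x)) =
            (L.any (fun s => pvAdjB s.1 s.2 y x)) := by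
          simp [List.any_cons, Bool.eq_false_iff.mpr ha]
        rw [ih, hinner, hc]
    · have hinner : pvGet (pvMarkB g s.1 s.2) y x = pvGet g y x := by
        rw [pvGet_markB, if_neg (fun h => hs h.2)]
      rw [ih, hinner, if_neg (fun h => hs h.2), if_neg (fun h => hs h.2)]

-- shape preservation through the marking fold
lemma pvLen_pvSet (g : List (List String)) (y x : Nat) (v : String) :
    (pvSet g y x v).length = g.length := List.length_set ..

lemma pvRowlen_pvSet (g : List (List String)) (a b : Nat) (v : String) (y : Nat) :
    ((pvSet g a b v).getD y []).length = (g.getD y []).length := by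
  by_cases h : a = y
  · subst h
    by_cases hl : a < g.length
    · rw [pvSet, pvGetD_set_self g a _ [] hl, List.length_set]
    · rw [pvSet, List.set_eq_of_length_le (by omega)]
  · rw [pvSet, pvGetD_set_ne g a y _ [] h]

lemma pvLen_condSet (g : List (List String)) (y x : Nat) :
    (pvCondSet g y x).length = g.length := by
  rw [pvCondSet]; split
  · exact pvLen_pvSet ..
  · rfl

lemma pvRowlen_condSet (g : List (List String)) (a b y : Nat) :
    ((pvCondSet g a b).getD y []).length = (g.getD y []).length := by
  rw [pvCondSet]; split
  · exact pvRowlen_pvSet ..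
  · rfl

lemma pvLen_markB (g : List (List String)) (sy sx : Int) :
    (pvMarkB g sy sx).length = g.length := by
  simp only [pvMarkB, pvOffsets, List.foldl, pvLen_condSet]

lemma pvRowlen_markB (g : List (List String)) (sy sx : Int) (y : Nat) :
    ((pvMarkB g sy sx).getD y []).length = (g.getD y []).length := by
  simp only [pvMarkB, pvOffsets, List.foldl, pvRowlen_condSet]

lemma pvLen_srcFold (L : List (Int × Int)) :
    ∀ g : List (List String),
      (L.foldl (fun g p => pvMarkB g p.1 p.2) g).length = g.length := by
  induction L with
  | nil => intro g; rfl
  | cons s L ih => intro g; simp only [List.foldl_cons]; rw [ih, pvLen_markB]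

lemma pvRowlen_srcFold (L : List (Int × Int)) :
    ∀ (g : List (List String)) (y : Nat),
      ((L.foldl (fun g p => pvMarkB g p.1 p.2) g).getD y []).length =
        ((g.getD y []).length) := by
  induction L with
  | nil => intro g y; rfl
  | cons s L ih => intro g y; simp only [List.foldl_cons]; rw [ih, pvRowlen_markB]

-- concrete facts about the 8 offsets
lemma pvOffsets_facts : ∀ d ∈ pvOffsets,
    (-1 : Int) ≤ d.1 ∧ d.1 ≤ 1 ∧ (-1 : Int) ≤ d.2 ∧ d.2 ≤ 1 ∧ (-d.1, -d.2) ∈ pvOffsets := by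
  decide

-- the source-existence test of A's fold equals B's neighbour `any`
lemma pvAny_bridge (P : List (List String)) (W : Int) (y x : Nat) :
    (((PySem.List.pyRange 1 ((P.length : Int) - 1) 1).flatMap (fun sy =>
        ((PySem.List.pyRange 1 (W - 1) 1).filter (fun sx =>
            (pvGet P sy.toNat sx.toNat != " ") && (pvGet P sy.toNat sx.toNat != "С"))).map
          (fun sx => (sy, sx)))).any (fun s => pvAdjB s.1 s.2 y x)) =
      (pvOffsets.any (fun d => pvFilled P (P.length : Int) W ((y : Int) + d.1) ((x : Int) + d.2))) := by
  rw [Bool.eq_iff_iff]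
  simp only [List.any_eq_true, List.mem_flatMap, List.mem_map, List.mem_filter,
    PySem.List.mem_pyRange_one, pvAdjB, List.contains_iff_exists_mem_beq, List.mem_map,
    pvFilled, Bool.and_eq_true, bne_iff_ne, decide_eq_true_eq, beq_iff_eq]
  constructor
  · rintro ⟨s, ⟨sy, ⟨hy1, hy2⟩, sx, ⟨⟨hx1, hx2⟩, hne1, hne2⟩, rfl⟩, p, ⟨d, hd, rfl⟩, hpq⟩
    obtain ⟨hd1, hd2, hd3, hd4, hdneg⟩ := pvOffsets_facts d hd
    have h1 : y = (sy + d.1).toNat := congrArg Prod.fst hpq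
    have h2 : x = (sx + d.2).toNat := congrArg Prod.snd hpq
    refine ⟨(-d.1, -d.2), hdneg, ?_⟩
    dsimp only
    have ey : ((y : Int) + -d.1).toNat = sy.toNat := by omega
    have ex : ((x : Int) + -d.2).toNat = sx.toNat := by omega
    refine ⟨⟨⟨by omega, by omega, by omega, by omega⟩, ?_⟩, ?_⟩
    · rw [ey, ex]; exact hne1
    · rw [ey, ex]; exact hne2
  · rintro ⟨d, hd, ⟨⟨hb1, hb2, hb3, hb4⟩, hn1⟩, hn2⟩
    obtain ⟨hd1, hd2, hd3, hd4, hdneg⟩ := pvOffsets_facts d hd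
    refine ⟨((y : Int) + d.1, (x : Int) + d.2),
      ⟨(y : Int) + d.1, ⟨hb1, hb2⟩, (x : Int) + d.2, ⟨⟨hb3, hb4⟩, hn1, hn2⟩, rfl⟩,
      (y, x), ⟨(-d.1, -d.2), hdneg, ?_⟩, rfl⟩
    dsimp only
    simp only [Prod.mk.injEq]
    omega

-- the marking fold equals B's per-cell recomputation, over the same padded grid P
lemma pvMain (P : List (List String)) (W : Int) :
    ((PySem.List.pyRange 1 ((P.length : Int) - 1) 1).flatMap (fun sy =>
        ((PySem.List.pyRange 1 (W - 1) 1).filter (fun sx =>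
            (pvGet P sy.toNat sx.toNat != " ") && (pvGet P sy.toNat sx.toNat != "С"))).map
          (fun sx => (sy, sx)))).foldl (fun g p => pvMarkB g p.1 p.2) P =
      (PySem.List.enumerate P 0).map (fun yr =>
        (PySem.List.enumerate yr.2 0).map (fun xc =>
          if xc.2 = " " ∧
              (pvOffsets.any (fun d => pvFilled P (P.length : Int) W (yr.1 + d.1) (xc.1 + d.2))) = true
          then "С" else xc.2)) := by
  apply List.ext_getElem
  · rw [pvLen_srcFold]
    simp [PySem.List.length_enumerate]
  · intro y hyl hyr
    have hy : y < P.length := by rwa [pvLen_srcFold] at hyl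
    apply List.ext_getElem
    · rw [← List.getD_eq_getElem _ [] hyl, pvRowlen_srcFold,
        List.getD_eq_getElem _ [] hy]
      simp [PySem.List.getElem_enumerate, PySem.List.length_enumerate]
    · intro x hxl hxr
      have hx : x < P[y].length := by
        rw [← List.getD_eq_getElem _ [] hyl, pvRowlen_srcFold,
          List.getD_eq_getElem _ [] hy] at hxl
        exact hxl
      have hget : pvGet P y x = P[y][x] := by
        rw [pvGet, List.getD_eq_getElem _ [] hy, List.getD_eq_getElem _ "" hx]
      have hL : (((PySem.List.pyRange 1 ((P.length : Int) - 1) 1).flatMap (fun sy =>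
          ((PySem.List.pyRange 1 (W - 1) 1).filter (fun sx =>
              (pvGet P sy.toNat sx.toNat != " ") && (pvGet P sy.toNat sx.toNat != "С"))).map
            (fun sx => (sy, sx)))).foldl (fun g p => pvMarkB g p.1 p.2) P)[y][x] =
          pvGet (((PySem.List.pyRange 1 ((P.length : Int) - 1) 1).flatMap (fun sy =>
            ((PySem.List.pyRange 1 (W - 1) 1).filter (fun sx =>
                (pvGet P sy.toNat sx.toNat != " ") && (pvGet P sy.toNat sx.toNat != "С"))).map
              (fun sx => (sy, sx)))).foldl (fun g p => pvMarkB g p.1 p.2) P) y x := by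
        rw [pvGet, List.getD_eq_getElem _ [] hyl, List.getD_eq_getElem _ "" hxl]
      rw [hL, pvGet_srcFold, pvAny_bridge, hget]
      simp only [List.getElem_map, PySem.List.getElem_enumerate]
      simp only [Int.zero_add]
      by_cases hs : P[y][x] = " " <;>
        by_cases hany : (pvOffsets.any (fun d =>
          pvFilled P (P.length : Int) W ((y : Int) + d.1) ((x : Int) + d.2))) = true <;>
        simp [hs, hany]

-- ==== A-side reduction to the fold over source cells (invariant machinery) ====
lemma pvInv_condSet (P g : List (List String)) (y x : Nat) (h : pvInv P g) :
    pvInv P (pvCondSet g y x) := by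
  intro y' x'
  by_cases hc : pvGet g y x = " "
  · rw [pvCondSet, if_pos hc]
    by_cases hp : y = y' ∧ x = x'
    · obtain ⟨rfl, rfl⟩ := hp
      obtain ⟨hy, hx⟩ := pvGet_space_in_range g y x hc
      rw [pvGet_pvSet_self g y x _ hy hx]
      rcases h y x with heq | ⟨_, hg⟩
      · exact Or.inr ⟨heq ▸ hc, rfl⟩
      · rw [hc] at hg; exact absurd hg (by decide)
    · rw [pvGet_pvSet_ne g y x y' x' _ (by tauto)]
      exact h y' x'
  · rw [pvCondSet, if_neg hc]; exact h y' x'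

lemma pvInv_markB (P g : List (List String)) (y x : Int) (h : pvInv P g) :
    pvInv P (pvMarkB g y x) := by
  simp only [pvMarkB, pvOffsets, List.foldl]
  exact pvInv_condSet _ _ _ _ (pvInv_condSet _ _ _ _ (pvInv_condSet _ _ _ _
    (pvInv_condSet _ _ _ _ (pvInv_condSet _ _ _ _ (pvInv_condSet _ _ _ _
      (pvInv_condSet _ _ _ _ (pvInv_condSet _ _ _ _ h)))))))

lemma pvSet_comm (g : List (List String)) (y x y' x' : Nat) (v v' : String)
    (h : y ≠ y' ∨ x ≠ x') : pvSet (pvSet g y x v) y' x' v' = pvSet (pvSet g y' x' v') y x v := by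
  by_cases hy : y = y'
  · subst hy
    have hx : x ≠ x' := h.resolve_left (by simp)
    by_cases hlen : y < g.length
    · rw [pvSet, pvSet, pvSet, pvSet, pvGetD_set_self g y _ [] hlen,
        pvGetD_set_self g y _ [] hlen, List.set_set, List.set_set,
        List.set_comm _ _ hx]
    · have hng : ∀ R : List String, g.set y R = g :=
        fun R => List.set_eq_of_length_le (by omega)
      simp only [pvSet, hng]
  · rw [pvSet, pvSet, pvSet, pvSet, pvGetD_set_ne g y y' _ [] hy,
      pvGetD_set_ne g y' y _ [] (Ne.symm hy), List.set_comm _ _ hy]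

lemma pvCondSet_comm (g : List (List String)) (y x y' x' : Nat)
    (h : y ≠ y' ∨ x ≠ x') :
    pvCondSet (pvCondSet g y x) y' x' = pvCondSet (pvCondSet g y' x') y x := by
  have h' : y' ≠ y ∨ x' ≠ x := by tauto
  unfold pvCondSet
  by_cases h1 : pvGet g y x = " " <;> by_cases h2 : pvGet g y' x' = " "
  · rw [if_pos h1, if_pos h2, pvGet_pvSet_ne g y x y' x' _ h, if_pos h2,
      pvGet_pvSet_ne g y' x' y x _ h', if_pos h1, pvSet_comm g y x y' x' _ _ h]
  · rw [if_pos h1, if_neg h2, pvGet_pvSet_ne g y x y' x' _ h, if_neg h2, if_pos h1]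
  · rw [if_neg h1, if_pos h2, pvGet_pvSet_ne g y' x' y x _ h', if_neg h1]
  · rw [if_neg h1, if_neg h2, if_neg h1]

lemma pvGuard_of_true (c : Prop) [Decidable c] (hc : c) (g : List (List String)) (y x : Nat) :
    pvGuard c g y x = pvCondSet g y x := by
  by_cases h : pvGet g y x = " " <;> simp [pvGuard, pvCondSet, hc, h]

-- the crux: one A-step equals the guarded B-mark, under the loop-invariant
lemma pvStep_eq (P : List (List String)) (H W : Int) (g : List (List String)) (y x : Int)
    (hInv : pvInv P g) (hy1 : 1 ≤ y) (hy2 : y < H - 1) (hx1 : 1 ≤ x) (hx2 : x < W - 1) :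
    pvStepA H W g y x =
      if (pvGet P y.toNat x.toNat != " ") && (pvGet P y.toNat x.toNat != "С") then
        pvMarkB g y x else g := by
  have hbx : (0:Int) ≤ x - 1 := by omega
  have hby : (0:Int) ≤ y - 1 := by omega
  have hux : x + 1 < W := by omega
  have huy : y + 1 < H := by omega
  rcases hInv y.toNat x.toNat with hc | ⟨hP, hg⟩
  · by_cases hs : pvGet P y.toNat x.toNat ≠ " " ∧ pvGet P y.toNat x.toNat ≠ "С"
    · have hbool : ((pvGet P y.toNat x.toNat != " ") && (pvGet P y.toNat x.toNat != "С")) = true := by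
        simp only [Bool.and_eq_true, bne_iff_ne]; exact hs
      rw [hbool, if_pos rfl, pvStepA, if_pos (by rw [hc]; exact hs)]
      rw [pvGuard_of_true ((0:Int) ≤ x - 1) hbx,
        pvGuard_of_true ((0:Int) ≤ x - 1 ∧ (0:Int) ≤ y - 1) ⟨hbx, hby⟩,
        pvGuard_of_true ((0:Int) ≤ y - 1) hby,
        pvGuard_of_true ((0:Int) ≤ y - 1 ∧ x + 1 < W) ⟨hby, hux⟩,
        pvGuard_of_true (x + 1 < W) hux,
        pvGuard_of_true (y + 1 < H) huy,
        pvGuard_of_true (y + 1 < H ∧ (0:Int) ≤ x - 1) ⟨huy, hbx⟩,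
        pvGuard_of_true (y + 1 < H ∧ x + 1 < W) ⟨huy, hux⟩]
      set j := (y - 1).toNat with hj
      set i := (x - 1).toNat with hi
      have e1 : y.toNat = j + 1 := by omega
      have e2 : (y + 1).toNat = j + 2 := by omega
      have e3 : x.toNat = i + 1 := by omega
      have e4 : (x + 1).toNat = i + 2 := by omega
      have e5 : (y + -1).toNat = j := by omega
      have e6 : (x + -1).toNat = i := by omega
      have e7 : (y + 0).toNat = j + 1 := by omega
      have e8 : (x + 0).toNat = i + 1 := by omega
      simp only [pvMarkB, pvOffsets, List.foldl]
      rw [e1, e2, e3, e4, e5, e6, e7, e8]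
      -- permute A's write order into B's: 4 swaps of writes at distinct cells
      rw [show ∀ G, pvCondSet (pvCondSet G (j+1) i) j i = pvCondSet (pvCondSet G j i) (j+1) i from
            fun G => pvCondSet_comm G _ _ _ _ (by omega),
          show ∀ G, pvCondSet (pvCondSet G (j+1) i) j (i+1) = pvCondSet (pvCondSet G j (i+1)) (j+1) i from
            fun G => pvCondSet_comm G _ _ _ _ (by omega),
          show ∀ G, pvCondSet (pvCondSet G (j+1) i) j (i+2) = pvCondSet (pvCondSet G j (i+2)) (j+1) i from
            fun G => pvCondSet_comm G _ _ _ _ (by omega),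
          show ∀ G, pvCondSet (pvCondSet G (j+2) (i+1)) (j+2) i = pvCondSet (pvCondSet G (j+2) i) (j+2) (i+1) from
            fun G => pvCondSet_comm G _ _ _ _ (by omega)]
    · have hbool : ((pvGet P y.toNat x.toNat != " ") && (pvGet P y.toNat x.toNat != "С")) = false := by
        rcases not_and_or.mp hs with h | h <;> simp [bne, not_not.mp h]
      rw [hbool, if_neg (by simp), pvStepA, if_neg (by rw [hc]; exact hs)]
  · have hbool : ((pvGet P y.toNat x.toNat != " ") && (pvGet P y.toNat x.toNat != "С")) = false := by
      simp [hP]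
    rw [hbool, if_neg (by simp), pvStepA, if_neg (by simp [hg])]

lemma pvInner (P : List (List String)) (H W : Int) (y : Int)
    (hy1 : 1 ≤ y) (hy2 : y < H - 1) :
    ∀ (xs : List Int) (g : List (List String)), pvInv P g →
      (∀ x ∈ xs, 1 ≤ x ∧ x < W - 1) →
      xs.foldl (fun g x => pvStepA H W g y x) g =
        xs.foldl (fun g x =>
          if (pvGet P y.toNat x.toNat != " ") && (pvGet P y.toNat x.toNat != "С") then
            pvMarkB g y x else g) g ∧
      pvInv P (xs.foldl (fun g x => pvStepA H W g y x) g)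
  | [], g, hInv, _ => ⟨rfl, hInv⟩
  | x :: xs, g, hInv, hb => by
    obtain ⟨hx1, hx2⟩ := hb x (by simp)
    have hstep := pvStep_eq P H W g y x hInv hy1 hy2 hx1 hx2
    have hInv' : pvInv P (pvStepA H W g y x) := by
      rw [hstep]
      split
      · exact pvInv_markB P g y x hInv
      · exact hInv
    have ih := pvInner P H W y hy1 hy2 xs (pvStepA H W g y x) hInv'
      (fun z hz => hb z (by simp [hz]))
    simp only [List.foldl_cons]
    exact ⟨by rw [ih.1, hstep], ih.2⟩

lemma pvOuter (P : List (List String)) (H W : Int) :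
    ∀ (ys : List Int) (g : List (List String)), pvInv P g →
      (∀ y ∈ ys, 1 ≤ y ∧ y < H - 1) →
      ys.foldl (fun g y =>
          (PySem.List.pyRange 1 (W - 1) 1).foldl (fun g x => pvStepA H W g y x) g) g =
        ys.foldl (fun g y =>
          (PySem.List.pyRange 1 (W - 1) 1).foldl (fun g x =>
            if (pvGet P y.toNat x.toNat != " ") && (pvGet P y.toNat x.toNat != "С") then
              pvMarkB g y x else g) g) g
  | [], g, hInv, _ => rfl
  | y :: ys, g, hInv, hb => by
    obtain ⟨hy1, hy2⟩ := hb y (by simp)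
    have hxbound : ∀ x ∈ PySem.List.pyRange 1 (W - 1) 1, 1 ≤ x ∧ x < W - 1 := by
      intro x hx
      exact (PySem.List.mem_pyRange_one.mp hx)
    have hin := pvInner P H W y hy1 hy2 (PySem.List.pyRange 1 (W - 1) 1) g hInv hxbound
    simp only [List.foldl_cons]
    rw [← hin.1]
    exact pvOuter P H W ys _ hin.2 (fun z hz => hb z (by simp [hz]))

-- the whole marking phase equals the fold over the source-cell list
lemma pvMark_eq (P : List (List String)) (H W : Int) :
    (PySem.List.pyRange 1 (H - 1) 1).foldl (fun g y =>
        (PySem.List.pyRange 1 (W - 1) 1).foldl (fun g x => pvStepA H W g y x) g) P =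
      ((PySem.List.pyRange 1 (H - 1) 1).flatMap (fun y =>
          ((PySem.List.pyRange 1 (W - 1) 1).filter (fun x =>
              (pvGet P y.toNat x.toNat != " ") && (pvGet P y.toNat x.toNat != "С"))).map
            (fun x => (y, x)))).foldl (fun g p => pvMarkB g p.1 p.2) P := by
  rw [List.foldl_flatMap]
  simp only [List.foldl_map, List.foldl_filter]
  exact pvOuter P H W _ P (pvInv_refl P)
    (fun y hy => PySem.List.mem_pyRange_one.mp hy)

-- padding: A's append-while loop produces the replicate-padded row
lemma pvPadLoop_eq : ∀ (fuel m : Nat) (row : List String), row.length ≤ m →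
    m - row.length ≤ fuel → pvPadLoop fuel m row = row ++ List.replicate (m - row.length) " "
  | 0, m, row, h1, h2 => by
    have : m = row.length := by omega
    simp [pvPadLoop, this]
  | fuel + 1, m, row, h1, h2 => by
    rw [pvPadLoop]
    by_cases he : row.length = m
    · simp [he]
    · rw [if_pos (by simpa using he)]
      rw [pvPadLoop_eq fuel m (row ++ [" "])
        (by simp only [List.length_append, List.length_cons, List.length_nil]; omega)
        (by simp only [List.length_append, List.length_cons, List.length_nil]; omega)]
      have : m - row.length = (m - (row ++ [" "]).length) + 1 := by
        simp only [List.length_append, List.length_cons, List.length_nil]; omega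
      rw [this, List.replicate_succ, List.append_assoc]
      rfl

lemma pvPadRow_eq (r : List String) (m : Nat) (h : r.length + 2 ≤ m) :
    pvPadLoop m m ([" "] ++ r ++ [" "]) = [" "] ++ r ++ List.replicate (m - r.length - 1) " " := by
  rw [pvPadLoop_eq m m _
    (by simp only [List.length_append, List.length_cons, List.length_nil]; omega)
    (by simp only [List.length_append, List.length_cons, List.length_nil]; omega)]
  have : m - ([" "] ++ r ++ [" "]).length = m - r.length - 2 := by
    simp only [List.length_append, List.length_cons, List.length_nil]; omega
  rw [this]
  have h2 : m - r.length - 1 = (m - r.length - 2) + 1 := by omega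
  rw [h2, List.replicate_succ, List.append_assoc, List.append_assoc]
  rfl

-- ===== VERDICT (by name: the statement is the Claim_ definition above) =====
theorem add_wall_spec : Claim_equal_add_wall := by
  intro field _ hpre
  unfold Spec_add_wall
  cases field with
  | nil => exact absurd rfl hpre
  | cons r0 rest =>
    rw [add_wall, add_wall_alt]
    set m : Nat := (((r0 :: rest).map (fun r => r.length)).max?.getD 0) + 2 with hm
    have hbound : ∀ r ∈ r0 :: rest, r.length + 2 ≤ m := by
      intro r hr
      have := List.le_max?_getD_of_mem (l := (r0 :: rest).map (fun r => r.length))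
        (List.mem_map_of_mem hr) (k := 0)
      omega
    have hrows : (r0 :: rest).map (fun r => pvPadLoop m m ([" "] ++ r ++ [" "])) =
        (r0 :: rest).map (fun r => [" "] ++ r ++ List.replicate (m - r.length - 1) " ") :=
      List.map_congr_left (fun r hr => pvPadRow_eq r m (hbound r hr))
    rw [hrows]
    have hlen0 : ([" "] ++ r0 ++ List.replicate (m - r0.length - 1) " ").length = m := by
      have := hbound r0 (by simp)
      simp
      omega
    simp only [List.map_cons, List.getD_cons_zero, hlen0]
    simp only [List.length_replicate]
    rw [pvMark_eq]
    exact pvMain _ _
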